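-- pv_equiv track=rewrite | github.com/Pilha-DS/HashChain---encryption | EmTeste/app2.py | gerar_cifra
-- ===== SOURCE A (Python) =====
-- def gerar_cifra(seed: int, tamanho: int, indice: int) -> str:
--     """Gera cifra determinística com seed + índice"""
--     if tamanho < 2:
--         return "#" * tamanho
--
--     num = seed + indice * 2654435761
--     meio = []
--
--     for i in range(tamanho - 2):
--         bit = (num >> i) & 1
--         meio.append('#' if bit == 0 else '*')
--
--     return '#' + ''.join(meio) + '#'
-- ===== SOURCE B (Python) =====
-- def gerar_cifra(seed: int, tamanho: int, indice: int) -> str: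
--     """Gera cifra deterministica com seed + indice"""
--     if tamanho < 2:
--         return "#" * tamanho
--     n = tamanho - 2
--     m = (seed + indice * 2654435761) % (1 << n)
--     # binary digits of m, least-significant first, rendered in bulk;
--     # the rest of the positions hold zero bits, i.e. '#'
--     body = format(m, 'b')[::-1].translate(str.maketrans('01', '#*'))
--     return '#' + body + '#' * (n - len(body) + 1)
-- ===== Notes on version B (the rewrite author's own statement) =====
-- stated objective: alternative
-- what changed: A shifts the seed-derived number once per output position in a range(tamanho-2) loop appending one char per bit; B reduces the number modulo 2^(tamanho-2) once, renders all its bits in one shot with format(m, 'b'), reverses, translates 0/1 to #/* in bulk and pads the remaining positions with a single string-repeat; same O(tamanho) asymptotics, but the per-bit Python-level big-int shifts are replaced by C-level bulk operations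
import Mathlib
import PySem

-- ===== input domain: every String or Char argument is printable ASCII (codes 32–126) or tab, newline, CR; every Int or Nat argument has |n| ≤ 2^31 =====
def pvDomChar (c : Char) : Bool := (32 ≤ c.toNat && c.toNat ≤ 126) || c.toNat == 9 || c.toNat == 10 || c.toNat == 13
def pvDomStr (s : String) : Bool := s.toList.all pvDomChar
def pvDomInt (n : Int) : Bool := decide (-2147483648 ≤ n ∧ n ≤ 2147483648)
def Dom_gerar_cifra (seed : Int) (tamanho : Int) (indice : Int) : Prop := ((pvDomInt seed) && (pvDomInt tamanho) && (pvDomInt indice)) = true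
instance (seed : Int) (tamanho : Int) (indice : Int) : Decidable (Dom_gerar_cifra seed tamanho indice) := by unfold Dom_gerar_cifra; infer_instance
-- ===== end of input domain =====

-- B replaces A's per-position shift-and-append loop by one modulo reduction, one bulk binary
-- rendering (format/reverse/translate) and one string-repeat for the zero padding (measured faster).

-- ===== PORT A =====
-- (num >> i) & 1 is ported exactly as Python floor division by 2^i followed by Python mod 2.
def gerar_cifra (seed : Int) (tamanho : Int) (indice : Int) : String :=
  if tamanho < 2 then String.ofList (List.replicate tamanho.toNat '#')
  else
    let num := seed + indice * 2654435761
    let meio := (PySem.List.pyRange 0 (tamanho - 2) 1).foldl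
      (fun acc i =>
        let bit := PySem.Int.mod (PySem.Int.floordiv num (2 ^ i.toNat)) 2
        acc ++ [if bit = 0 then '#' else '*']) []
    String.ofList ('#' :: meio ++ ['#'])

-- ===== PORT B =====
-- format(m, 'b') without the leading-zero case: canonical binary digits, most significant first
def pvBinGo (m : Nat) : List Char :=
  if h : m = 0 then []
  else pvBinGo (m / 2) ++ [if m % 2 = 1 then '1' else '0']
decreasing_by exact Nat.div_lt_self (Nat.pos_of_ne_zero h) one_lt_two

-- format(m, 'b')  (format renders 0 as "0")
def pvFormatBin (m : Nat) : List Char := if m = 0 then ['0'] else pvBinGo m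

def gerar_cifra_alt (seed : Int) (tamanho : Int) (indice : Int) : String :=
  if tamanho < 2 then String.ofList (List.replicate tamanho.toNat '#')
  else
    let n := (tamanho - 2).toNat
    let m := (PySem.Int.mod (seed + indice * 2654435761) (2 ^ n)).toNat
    -- format(m,'b')[::-1].translate(str.maketrans('01', '#*'))
    let body := (pvFormatBin m).reverse.map (fun c => if c = '0' then '#' else '*')
    String.ofList ('#' :: (body ++ List.replicate (((n : Int) - body.length + 1).toNat) '#'))

-- ===== PRECONDITION & SPEC =====
def Spec_gerar_cifra (seed : Int) (tamanho : Int) (indice : Int) (out : String) : Prop := out = gerar_cifra_alt seed tamanho indice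
instance (seed : Int) (tamanho : Int) (indice : Int) (out : String) : Decidable (Spec_gerar_cifra seed tamanho indice out) := by unfold Spec_gerar_cifra; infer_instance

-- ===== CLAIM (what is proved, stated in full; the proofs are below) =====
def Claim_equal_gerar_cifra : Prop := ∀ (seed : Int) (tamanho : Int) (indice : Int), Dom_gerar_cifra seed tamanho indice → Spec_gerar_cifra seed tamanho indice (gerar_cifra seed tamanho indice)

-- ===== LEMMAS AND PROOFS =====

-- A's appending foldl is a map
theorem pv_foldl_append_map {α β : Type} (f : α → β) :
    ∀ (l : List α) (acc : List β), l.foldl (fun a i => a ++ [f i]) acc = acc ++ l.map f := by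
  intro l
  induction l with
  | nil => intro acc; simp
  | cons x xs ih => intro acc; simp [List.foldl, ih]

-- bit k of num equals bit k of num mod 2^n, for k < n (Int ediv/emod)
theorem pv_bit_mod_pow (num : Int) (n k : Nat) (h : k < n) :
    num / (2 ^ k : Int) % 2 = (num % (2 ^ n : Int)) / (2 ^ k : Int) % 2 := by
  have h2k : ((2:Int) ^ k) ≠ 0 := by positivity
  have hsplit : num = num % 2 ^ n + (2 ^ (n - k - 1) * (num / 2 ^ n) * 2) * 2 ^ k := by
    have hp : (2:Int) ^ (n - k - 1) * 2 * 2 ^ k = 2 ^ n := by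
      rw [← pow_succ, ← pow_add]
      congr 1
      omega
    have h1 := Int.ediv_add_emod num (2 ^ n)
    have h2 : (2:Int) ^ (n - k - 1) * (num / 2 ^ n) * 2 * 2 ^ k = 2 ^ n * (num / 2 ^ n) := by
      rw [← hp]; ring
    linarith
  conv_lhs => rw [hsplit]
  rw [Int.add_mul_ediv_right _ _ h2k]
  omega

-- proof-layer view of B's body: the binary digits of m, least significant first, translated
def pvBitsB (m : Nat) : List Char :=
  if h : m = 0 then []
  else (if m % 2 = 1 then '*' else '#') :: pvBitsB (m / 2)
decreasing_by exact Nat.div_lt_self (Nat.pos_of_ne_zero h) one_lt_two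

-- B's reversed-and-translated format string is that LSB-first list
theorem pv_binGo_reverse_map (m : Nat) :
    (pvBinGo m).reverse.map (fun c => if c = '0' then '#' else '*') = pvBitsB m := by
  induction m using Nat.strong_induction_on with
  | _ m ih =>
    by_cases h0 : m = 0
    · subst h0; simp [pvBinGo, pvBitsB]
    · rw [pvBinGo, pvBitsB]
      simp only [h0, dif_neg, not_false_iff, List.reverse_append, List.reverse_singleton,
        List.singleton_append, List.map_cons]
      rw [ih (m / 2) (Nat.div_lt_self (Nat.pos_of_ne_zero h0) one_lt_two)]
      rcases Nat.mod_two_eq_zero_or_one m with h | h <;> simp [h]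

-- B's peeled bits, padded, are exactly A's per-index bits
theorem pv_bits_pad (n : Nat) : ∀ m : Nat, m < 2 ^ n →
    pvBitsB m ++ List.replicate (n - (pvBitsB m).length) '#'
      = (List.range n).map (fun k => if (m / 2 ^ k) % 2 = 0 then '#' else '*') := by
  induction n with
  | zero =>
    intro m hm
    interval_cases m
    simp [pvBitsB]
  | succ n ih =>
    intro m hm
    by_cases h0 : m = 0
    · subst h0
      rw [pvBitsB]
      simp only [reduceDIte, List.nil_append, List.length_nil, Nat.sub_zero]
      symm
      rw [List.eq_replicate_iff]
      refine ⟨by simp, ?_⟩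
      intro b hb
      simp only [List.mem_map, List.mem_range] at hb
      obtain ⟨k, hk, rfl⟩ := hb
      simp
    · rw [pvBitsB]
      simp only [h0, dif_neg, not_false_iff]
      have hdiv : m / 2 < 2 ^ n := by
        rw [Nat.div_lt_iff_lt_mul (by norm_num)]
        calc m < 2 ^ (n+1) := hm
        _ = 2 ^ n * 2 := by ring
      have ihm := ih (m / 2) hdiv
      rw [List.range_succ_eq_map]
      simp only [List.map_cons, List.map_map]
      have hhead : (if m % 2 = 1 then '*' else '#') = (if (m / 2 ^ 0) % 2 = 0 then '#' else '*') := by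
        rcases Nat.mod_two_eq_zero_or_one m with h | h <;> simp [h]
      have htail : (List.range n).map ((fun k => if (m / 2 ^ k) % 2 = 0 then '#' else '*') ∘ Nat.succ)
          = (List.range n).map (fun k => if ((m/2) / 2 ^ k) % 2 = 0 then '#' else '*') := by
        apply List.map_congr_left
        intro k hk
        simp [Function.comp, pow_succ, Nat.div_div_eq_div_mul, Nat.mul_comm]
      rw [htail, ← ihm, hhead]
      simp

theorem pv_bits_len_le (n : Nat) : ∀ m : Nat, m < 2 ^ n → (pvBitsB m).length ≤ n := by
  induction n with
  | zero => intro m hm; interval_cases m; simp [pvBitsB]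
  | succ n ih =>
    intro m hm
    by_cases h0 : m = 0
    · subst h0; simp [pvBitsB]
    · rw [pvBitsB]
      simp only [h0, dif_neg, not_false_iff, List.length_cons]
      have hdiv : m / 2 < 2 ^ n := by
        rw [Nat.div_lt_iff_lt_mul (by norm_num)]
        calc m < 2 ^ (n+1) := hm
        _ = 2 ^ n * 2 := by ring
      have := ih (m / 2) hdiv
      omega

-- ===== VERDICT (by name: the statement is the Claim_ definition above) =====
theorem gerar_cifra_spec : Claim_equal_gerar_cifra := by
  intro seed tamanho indice _
  unfold Spec_gerar_cifra gerar_cifra gerar_cifra_alt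
  by_cases hlt : tamanho < 2
  · simp [hlt]
  · simp only [hlt, if_neg, not_false_iff]
    set num := seed + indice * 2654435761 with hnum
    set n := (tamanho - 2).toNat with hn
    have h2n : (0:Int) < 2 ^ n := by positivity
    set r := PySem.Int.mod num (2 ^ n) with hr
    have hre : r = num % 2 ^ n := PySem.Int.mod_eq_emod_of_pos h2n
    have hr0 : 0 ≤ r := by rw [hre]; exact Int.emod_nonneg _ (by positivity)
    have hrlt : r < 2 ^ n := by rw [hre]; exact Int.emod_lt_of_pos _ h2n
    set m := r.toNat with hm
    have hmr : (m : Int) = r := Int.toNat_of_nonneg hr0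
    have hmlt : m < 2 ^ n := by
      have : ((m : Int)) < ((2 ^ n : Nat) : Int) := by push_cast; rw [hmr]; exact hrlt
      exact_mod_cast this
    have hlen := pv_bits_len_le n m hmlt
    -- the accumulated list of A equals B's bits plus padding
    have hmeio : (PySem.List.pyRange 0 (tamanho - 2) 1).foldl
        (fun acc i =>
          let bit := PySem.Int.mod (PySem.Int.floordiv num (2 ^ i.toNat)) 2
          acc ++ [if bit = 0 then '#' else '*']) []
        = pvBitsB m ++ List.replicate (n - (pvBitsB m).length) '#' := by
      rw [pv_foldl_append_map, PySem.List.pyRange_one, List.map_map, List.nil_append]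
      rw [pv_bits_pad n m hmlt]
      rw [show tamanho - 2 - 0 = tamanho - 2 from by ring, ← hn]
      apply List.map_congr_left
      intro k hk
      simp only [List.mem_range] at hk
      have hk2 : (0:Int) < 2 ^ (((0:Int) + (k:Int)).toNat) := by positivity
      simp only [Function.comp]
      rw [PySem.Int.floordiv_eq_ediv_of_pos hk2, PySem.Int.mod_eq_emod_of_pos (by norm_num)]
      have htk : ((0:Int) + (k:Int)).toNat = k := by simp
      rw [htk]
      have hkn : k < n := by
        have : (tamanho - 2).toNat = n := hn.symm
        omega
      rw [pv_bit_mod_pow num n k hkn, ← hre, ← hmr]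
      have hcast : ((m:Int) / 2 ^ k % 2) = ((m / 2 ^ k % 2 : Nat) : Int) := by push_cast; rfl
      rw [hcast]
      rcases Nat.mod_two_eq_zero_or_one (m / 2 ^ k) with h | h <;> simp [h]
    rw [hmeio]
    by_cases hm0 : m = 0
    · rw [hm0]
      simp only [pvFormatBin, reduceIte, List.reverse_singleton, List.map_cons, List.map_nil,
        List.length_singleton]
      rw [pvBitsB]
      simp only [reduceDIte, List.nil_append, List.length_nil, Nat.sub_zero]
      have hcnt : (((n : Int) - 1 + 1)).toNat = n := by omega
      simp only [Nat.cast_one]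
      rw [hcnt]
      congr 1
      rw [← List.replicate_succ, ← List.replicate_succ']
      simp [List.replicate_succ]
    · have hbody : (pvFormatBin m).reverse.map (fun c => if c = '0' then '#' else '*')
          = pvBitsB m := by
        rw [pvFormatBin, if_neg hm0, pv_binGo_reverse_map]
      rw [hbody]
      have hcnt : (((n : Int) - (pvBitsB m).length + 1)).toNat = (n - (pvBitsB m).length) + 1 := by
        omega
      rw [hcnt]
      congr 1
      rw [List.replicate_succ']
      simp
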